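-- pv_equiv track=rewrite | github.com/TaylorTree/statio | statio/core.py | bottom_values
-- ===== SOURCE A (Python) =====
-- import bisect
--
-- def bottom_values(values, period=None, num=1):
--     """Returns list of bottom num items.
--
--     :param values: list of values to iterate and compute stat.
--     :param period: (optional) # of values included in computation.
--         * None - includes all values in computation.
--     :param num: the num in the bottom num items.
--     :rtype: list of windowed bottom num items.
--
--     Examples:
--     >>> values = [34, 30, 29, 34, 38, 25, 35]
--     >>> bottom_values(values, 3, 2)  #3 period window and top 2 items.
--     [[34], [30, 34], [29, 30], [29, 30], [29, 34], [25, 34], [25, 35]]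
--     """
--     if period:
--         if period < 1:
--             raise ValueError("period must be 1 or greater")
--
--         period = int(period)
--
--     if num:
--         num = int(num)
--
--     results = []
--     recs = []
--     _additem = bisect.insort
--     _search = bisect.bisect_left
--
--     for bar, newx in enumerate(values):
--         if period and (bar >= period):
--             item = values[bar - period]
--             idx = _search(recs, item)
--             del recs[idx]
--
--         _additem(recs, newx)
--
--         endidx = num
--         if bar < num - 1:
--             endidx = bar + 1
--
--         lastval = recs[0:endidx]
--
--         results.append(lastval)
--
--     return results
-- ===== SOURCE B (Python) =====
-- def bottom_values(values, period=None, num=1):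
--     """Windowed bottom-num values, recomputed per position from a slice.
--
--     Returns, for each index i, the smallest min(num, i+1) values of the
--     current window (last `period` values, or all values so far if period
--     is falsy), in ascending order.
--     """
--     if period:
--         if period < 1:
--             raise ValueError("period must be 1 or greater")
--         period = int(period)
--     if num:
--         num = int(num)
--
--     results = []
--     for i in range(len(values)):
--         start = max(0, i - period + 1) if period else 0
--         window = sorted(values[start:i + 1])
--         results.append(window[:min(num, i + 1)])
--     return results
-- ===== Notes on version B (the rewrite author's own statement) =====
-- stated objective: alternative
-- what changed: A maintains one sorted window incrementally across the loop with bisect insort/delete; B is stateless: for each position it slices the current window out of the input, sorts it, and takes the first min(num, i+1) elements.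
import Mathlib
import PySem

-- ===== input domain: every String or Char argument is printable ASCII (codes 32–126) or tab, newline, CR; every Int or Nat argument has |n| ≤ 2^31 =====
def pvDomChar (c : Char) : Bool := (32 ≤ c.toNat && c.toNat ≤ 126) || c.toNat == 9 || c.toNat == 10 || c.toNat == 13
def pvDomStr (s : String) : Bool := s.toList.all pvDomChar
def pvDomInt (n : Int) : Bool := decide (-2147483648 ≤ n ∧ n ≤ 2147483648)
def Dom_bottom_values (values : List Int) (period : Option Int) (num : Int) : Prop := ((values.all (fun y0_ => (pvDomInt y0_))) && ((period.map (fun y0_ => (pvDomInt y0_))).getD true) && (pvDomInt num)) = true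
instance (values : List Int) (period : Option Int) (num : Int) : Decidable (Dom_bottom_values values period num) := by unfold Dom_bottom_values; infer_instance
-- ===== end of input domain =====

-- B replaces A's incrementally maintained sorted window (bisect insort/delete) by a stateless
-- per-position slice-sort-prefix computation (alternative decomposition, not claimed faster).

-- ===== PORT A =====
-- the 'for bar, newx in enumerate(values)' loop of A, carrying recs; results built by cons
def bvLoopA (values : List Int) (pT : Bool) (p num : Int) : List (Int × Int) → List Int → List (List Int)
  | [], _ => []
  | (bar, newx) :: rest, recs =>
    -- if period and (bar >= period): del recs[bisect_left(recs, values[bar - period])]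
    let recs1 :=
      if pT && decide (p ≤ bar) then
        recs.eraseIdx (PySem.List.bisectLeft recs (PySem.List.pyGetD values (bar - p) 0))
      else recs
    -- bisect.insort(recs, newx)
    let recs2 := PySem.List.insertBy (fun a b => decide (a < b)) newx recs1
    -- endidx = num; if bar < num - 1: endidx = bar + 1
    let endidx : Int := if bar < num - 1 then bar + 1 else num
    -- results.append(recs[0:endidx])
    PySem.List.slice recs2 (some 0) (some endidx) :: bvLoopA values pT p num rest recs2

def bottom_values (values : List Int) (period : Option Int) (num : Int) : List (List Int) :=
  let pT : Bool := match period with | some p => decide (p ≠ 0) | none => false  -- 'if period:'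
  let p : Int := period.getD 0
  bvLoopA values pT p num (PySem.List.enumerate values) []

-- ===== PORT B =====
def bottom_values_alt (values : List Int) (period : Option Int) (num : Int) : List (List Int) :=
  let pT : Bool := match period with | some p => decide (p ≠ 0) | none => false  -- 'if period'
  let p : Int := period.getD 0
  (List.range values.length).map (fun (i : Nat) =>
    let start : Int := if pT then max 0 ((i : Int) - p + 1) else 0
    PySem.List.slice
      (PySem.List.sorted (PySem.List.slice values (some start) (some ((i : Int) + 1))) (fun v => v))
      (some 0) (some (min num ((i : Int) + 1))))

-- ===== PRECONDITION & SPEC =====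
-- A (and B alike) raise ValueError when period is a negative number; Pre_ excludes exactly those inputs.
def Pre_bottom_values (values : List Int) (period : Option Int) (num : Int) : Prop :=
  0 ≤ period.getD 0
instance (values : List Int) (period : Option Int) (num : Int) : Decidable (Pre_bottom_values values period num) := by unfold Pre_bottom_values; infer_instance

def pvWitness_bottom_values : List Int × Option Int × Int := ([34, 30, 29, 34, 38, 25, 35], some 3, 2)

def Spec_bottom_values (values : List Int) (period : Option Int) (num : Int) (out : List (List Int)) : Prop := out = bottom_values_alt values period num
instance (values : List Int) (period : Option Int) (num : Int) (out : List (List Int)) : Decidable (Spec_bottom_values values period num out) := by unfold Spec_bottom_values; infer_instance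

-- ===== CLAIM (what is proved, stated in full; the proofs are below) =====
def Claim_equal_bottom_values : Prop := ∀ (values : List Int) (period : Option Int) (num : Int), Dom_bottom_values values period num → Pre_bottom_values values period num → Spec_bottom_values values period num (bottom_values values period num)

-- ===== LEMMAS AND PROOFS =====

-- for sorted l with x ∈ l, 'del l[bisect_left(l, x)]' removes one occurrence of x
lemma eraseIdx_bisectLeft_perm (l : List Int) (x : Int)
    (hs : l.Pairwise (· ≤ ·)) (hx : x ∈ l) :
    (x :: l.eraseIdx (PySem.List.bisectLeft l x)).Perm l := by
  obtain ⟨hle, hlt, hge⟩ := PySem.List.bisectLeft_spec l x hs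
  set i := PySem.List.bisectLeft l x with hi
  obtain ⟨j, hj, hjx⟩ := List.getElem_of_mem hx
  have hji : i ≤ j := by
    by_contra h
    exact absurd hjx (by have := hlt j hj (by omega); omega)
  have hilen : i < l.length := lt_of_le_of_lt hji hj
  have hxi : l[i] = x := by
    have h1 := hge i hilen le_rfl
    rcases eq_or_lt_of_le hji with h | h
    · exact h ▸ hjx
    · have := (List.pairwise_iff_getElem.mp hs) i j hilen hj h
      omega
  have hdec : l = l.take i ++ x :: l.drop (i+1) := by
    rw [← hxi, ← List.drop_eq_getElem_cons hilen, List.take_append_drop]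
  rw [List.eraseIdx_eq_take_drop_succ]
  conv_rhs => rw [hdec]
  exact List.perm_middle.symm

-- deleting the window's oldest element from the sorted window yields the sorted shrunk window
lemma erase_head_sorted (x : Int) (w : List Int) :
    (PySem.List.sorted (x :: w) (fun v => v)).eraseIdx
      (PySem.List.bisectLeft (PySem.List.sorted (x :: w) (fun v => v)) x) =
    PySem.List.sorted w (fun v => v) := by
  set L := PySem.List.sorted (x :: w) (fun v => v) with hL
  have hsL : L.Pairwise (· ≤ ·) := PySem.List.sorted_pairwise (x :: w) (fun v => v)
  have hxL : x ∈ L := ((PySem.List.sorted_perm (x :: w) (fun v => v) false).mem_iff).mpr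
    (List.mem_cons_self)
  have h1 := eraseIdx_bisectLeft_perm L x hsL hxL
  symm
  apply PySem.List.sorted_id_eq_of_perm_of_pairwise
  · have h2 : (x :: L.eraseIdx (PySem.List.bisectLeft L x)).Perm (x :: w) :=
      h1.trans (PySem.List.sorted_perm (x :: w) (fun v => v) false)
    exact h2.cons_inv
  · exact hsL.sublist (List.eraseIdx_sublist L _)

-- bisect.insort into the sorted window is sorting the window extended at the right
lemma insertBy_sorted (xs : List Int) (x : Int) :
    PySem.List.insertBy (fun a b => decide (a < b)) x (PySem.List.sorted xs (fun v => v)) =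
    PySem.List.sorted (xs ++ [x]) (fun v => v) := by
  rw [PySem.List.sorted_eq_foldl_insertBy xs, PySem.List.sorted_eq_foldl_insertBy (xs ++ [x]),
    List.foldl_append]
  rfl

-- the loop invariant: at index k, recs is the sorted current window
lemma bvLoopA_eq (values : List Int) (pT : Bool) (p num : Int) (hp : pT = true → 1 ≤ p) :
    ∀ (rest : List Int) (k : Nat), values.drop k = rest →
    bvLoopA values pT p num (PySem.List.enumerate rest (k : Int))
      (PySem.List.sorted ((values.take k).drop (if pT then k - p.toNat else 0)) (fun v => v)) =
    (List.range' k rest.length).map (fun (i : Nat) =>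
      let start : Int := if pT then max 0 ((i : Int) - p + 1) else 0
      PySem.List.slice
        (PySem.List.sorted (PySem.List.slice values (some start) (some ((i : Int) + 1))) (fun v => v))
        (some 0) (some (min num ((i : Int) + 1)))) := by
  intro rest
  induction rest with
  | nil => intro k h; simp [PySem.List.enumerate, bvLoopA]
  | cons x rest' ih =>
    intro k h
    have hk : k < values.length := by
      have := congrArg List.length h
      simp at this; omega
    have hdk := List.drop_eq_getElem_cons hk
    rw [h] at hdk
    obtain ⟨hvk, hrest'⟩ : values[k] = x ∧ values.drop (k+1) = rest' := by
      injection hdk with h1 h2; exact ⟨h1.symm, h2.symm⟩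
    rw [PySem.List.enumerate_cons]
    simp only [bvLoopA]
    -- notation for the pre- and post-step window starts
    set sk : Nat := if pT then k - p.toNat else 0 with hsk
    set sk1 : Nat := if pT then (k+1) - p.toNat else 0 with hsk1
    have hsk1_le : sk1 ≤ k := by
      rcases hpt : pT with _ | _
      · simp [hsk1, hpt]
      · have := hp hpt; simp [hsk1, hpt]; omega
    -- step 1: the deletion turns sorted window(k, sk) into sorted window(k, sk1)
    have hdel :
        (if pT && decide (p ≤ (k:Int)) then
          (PySem.List.sorted ((values.take k).drop sk) (fun v => v)).eraseIdx
            (PySem.List.bisectLeft (PySem.List.sorted ((values.take k).drop sk) (fun v => v))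
              (PySem.List.pyGetD values ((k:Int) - p) 0))
         else PySem.List.sorted ((values.take k).drop sk) (fun v => v)) =
        PySem.List.sorted ((values.take k).drop sk1) (fun v => v) := by
      rcases hpt : pT with _ | _
      · have : sk = sk1 := by simp [hsk, hsk1, hpt]
        simp [this]
      · have hp1 := hp hpt
        by_cases hpk : p ≤ (k:Int)
        · have hsv : sk = k - p.toNat := by simp [hsk, hpt]
          have hsv1 : sk1 = sk + 1 := by simp [hsk1, hsk, hpt]; omega
          have hidx : ((k:Int) - p) = ((k - p.toNat : Nat) : Int) := by omega
          have hlt : k - p.toNat < (values.take k).length := by simp; omega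
          have hitem : PySem.List.pyGetD values ((k:Int) - p) 0 = (values.take k)[k - p.toNat] := by
            rw [hidx, PySem.List.pyGetD_natCast]
            rw [List.getElem_take]
            exact List.getD_eq_getElem _ _ (by omega)
          have hw : (values.take k).drop sk =
              (values.take k)[k - p.toNat] :: (values.take k).drop sk1 := by
            rw [hsv, hsv1, hsv]
            exact List.drop_eq_getElem_cons hlt
          simp only [hpk, decide_true, Bool.true_and, if_true, hitem, hw]
          exact erase_head_sorted _ _
        · have : sk = sk1 := by simp [hsk, hsk1, hpt]; omega
          simp [hpk, this]
    rw [hdel, insertBy_sorted]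
    -- step 2: the extended window is window(k+1, sk1)
    have hwin : (values.take k).drop sk1 ++ [x] = (values.take (k+1)).drop sk1 := by
      rw [List.take_add_one, List.getElem?_eq_getElem hk, hvk]
      rw [List.drop_append_of_le_length (by simp; omega)]
      rfl
    rw [hwin]
    -- step 3: B's window slice is the same list
    have hslice : ∀ (st : Int), 0 ≤ st → st.toNat = sk1 →
        PySem.List.slice values (some st) (some ((k:Int) + 1)) = (values.take (k+1)).drop sk1 := by
      intro st h0 hst
      rw [PySem.List.slice_toNat values h0 (by omega)]
      rw [show ((k:Int)+1).toNat = k+1 by omega, hst]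
      rw [List.drop_take]
    have hstart :
        PySem.List.slice values (some (if pT then max 0 ((k:Int) - p + 1) else 0))
            (some ((k:Int) + 1)) =
        (values.take (k+1)).drop sk1 := by
      rcases hpt : pT with _ | _
      · exact hslice 0 le_rfl (by simp [hsk1, hpt])
      · have hp1 := hp hpt
        exact hslice _ (le_max_left _ _) (by simp [hsk1, hpt]; omega)
    -- step 4: endidx = min num (k+1)
    have hend : (if (k:Int) < num - 1 then (k:Int) + 1 else num) = min num ((k:Int) + 1) := by
      split_ifs with h <;> omega
    -- assemble
    rw [List.length_cons, List.range'_succ, List.map_cons]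
    congr 1
    · simp only [hstart, hend]
    · rw [show ((k:Int) + 1) = ((k+1 : Nat) : Int) from by push_cast; ring]
      exact ih (k+1) hrest'

-- ===== VERDICT (by name: the statement is the Claim_ definition above) =====
theorem bottom_values_spec : Claim_equal_bottom_values := by
  intro values period num _ hpre
  unfold Pre_bottom_values at hpre
  unfold Spec_bottom_values bottom_values bottom_values_alt
  cases period with
  | none =>
    have h0 := bvLoopA_eq values false 0 num (by simp) values 0 (by simp)
    simp only [Nat.cast_zero, List.take_zero, List.drop_nil] at h0
    rw [show PySem.List.sorted ([] : List Int) (fun v => v) = [] from rfl] at h0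
    rw [List.range_eq_range']
    exact h0
  | some q =>
    simp only [Option.getD_some] at hpre
    have hp : decide (q ≠ 0) = true → 1 ≤ q := by
      intro h; simp at h; omega
    have h0 := bvLoopA_eq values (decide (q ≠ 0)) q num hp values 0 (by simp)
    simp only [Nat.cast_zero, List.take_zero, List.drop_nil] at h0
    rw [show PySem.List.sorted ([] : List Int) (fun v => v) = [] from rfl] at h0
    rw [List.range_eq_range']
    exact h0
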